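-- pv_equiv track=rewrite | github.com/PID64500/Cobol_Tools_With_Python | build_data_dictionary.py | should_ignore_entry
-- ===== SOURCE A (Python) =====
-- from typing import List, Optional, Tuple
--
-- def should_ignore_entry(entry: dict, rules: List[dict]) -> bool:
--     """
--     Détermine si une entrée du dictionnaire doit être ignorée
--     en fonction des règles chargées.
--
--     V1 : on supporte principalement les match_type suivants :
--       - NAME_EXACT  : name == pattern
--       - NAME_PREFIX : name commence par pattern
--
--     Le champ 'scope' permet de limiter la règle à un programme :
--       - "ALL" : tous les programmes
--       - sinon : nom exact de programme (PROGRAM-ID).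
--     """
--     if not rules:
--         return False
--
--     program = (entry.get("program") or "").strip().upper()
--     name = (entry.get("name") or "").strip().upper()
--
--     for rule in rules:
--         scope = rule.get("scope", "ALL")
--         match_type = rule.get("match_type", "NAME_EXACT")
--         pattern = rule.get("pattern", "")
--
--         if not pattern:
--             continue
--
--         # Filtre sur le scope (programme)
--         if scope not in ("", "ALL") and scope != program:
--             continue
--
--         if match_type == "NAME_EXACT":
--             if name == pattern:
--                 return True
--         elif match_type == "NAME_PREFIX":
--             if name.startswith(pattern):
--                 return True
--         else:
--             # Match types non gérés en V1 → ignorés proprement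
--             continue
--
--     return False
-- ===== SOURCE B (Python) =====
-- def should_ignore_entry(entry: dict, rules) -> bool:
--     # Phase 1: collect applicable patterns, grouped by match type.
--     program = (entry.get("program") or "").strip().upper()
--     exact = set()
--     prefixes = []
--     for rule in rules:
--         pattern = rule.get("pattern", "")
--         if not pattern:
--             continue
--         scope = rule.get("scope", "ALL")
--         if scope not in ("", "ALL") and scope != program:
--             continue
--         match_type = rule.get("match_type", "NAME_EXACT")
--         if match_type == "NAME_EXACT":
--             exact.add(pattern)
--         elif match_type == "NAME_PREFIX":
--             prefixes.append(pattern)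
--         # other match types are unsupported in V1 -> dropped
--     # Phase 2: one check against the grouped patterns.
--     name = (entry.get("name") or "").strip().upper()
--     return name in exact or any(name.startswith(p) for p in prefixes)
-- ===== Notes on version B (the rewrite author's own statement) =====
-- stated objective: alternative
-- what changed: B replaces A's single flat loop with per-rule early return by a two-phase group-then-check: one pass partitions applicable patterns into an exact-match set and a prefix list, then one membership/prefix check against the grouped patterns decides the result.
import Mathlib
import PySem

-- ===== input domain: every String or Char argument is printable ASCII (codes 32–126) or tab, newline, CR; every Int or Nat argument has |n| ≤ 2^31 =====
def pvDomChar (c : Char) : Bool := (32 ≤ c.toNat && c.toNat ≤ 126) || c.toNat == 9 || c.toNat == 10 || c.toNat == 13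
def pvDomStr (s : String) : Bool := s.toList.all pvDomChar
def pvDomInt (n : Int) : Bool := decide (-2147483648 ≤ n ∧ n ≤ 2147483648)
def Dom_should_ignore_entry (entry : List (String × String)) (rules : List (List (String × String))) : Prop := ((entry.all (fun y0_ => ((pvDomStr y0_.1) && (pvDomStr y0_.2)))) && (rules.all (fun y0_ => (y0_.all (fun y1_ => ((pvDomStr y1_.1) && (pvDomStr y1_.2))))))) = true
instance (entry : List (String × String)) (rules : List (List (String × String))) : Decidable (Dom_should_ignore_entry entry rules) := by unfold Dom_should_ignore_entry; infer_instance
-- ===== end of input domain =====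

-- B replaces A's flat loop with early return by a two-phase group-then-check (partition applicable patterns into an exact-match set and a prefix list, then one check); same cost, alternative structure.


-- ===== PORT A =====
-- (entry.get(k) or "").strip().upper() — shared normalization line of both Pythons
def pvNorm (entry : List (String × String)) (k : String) : String :=
  PySem.Str.upper (PySem.Str.strip ((PySem.Dict.mk entry).getD k ""))

-- A's single for-loop over rules with early return
def pvALoop (program name : String) : List (List (String × String)) → Bool
  | [] => false
  | r :: rest =>
    let d := PySem.Dict.mk r
    let scope := d.getD "scope" "ALL"
    let match_type := d.getD "match_type" "NAME_EXACT"
    let pattern := d.getD "pattern" ""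
    if pattern = "" then pvALoop program name rest
    else if (scope ≠ "" ∧ scope ≠ "ALL") ∧ scope ≠ program then pvALoop program name rest
    else if match_type = "NAME_EXACT" then
      if name = pattern then true else pvALoop program name rest
    else if match_type = "NAME_PREFIX" then
      if PySem.Str.startswith name pattern then true else pvALoop program name rest
    else pvALoop program name rest

def should_ignore_entry (entry : List (String × String)) (rules : List (List (String × String))) : Bool :=
  if rules = [] then false
  else pvALoop (pvNorm entry "program") (pvNorm entry "name") rules

-- ===== PORT B =====
-- phase 1: classify one rule into the (exact-set, prefix-list) accumulator
def pvClassify (program : String) (acc : PySem.Set String × List String)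
    (r : List (String × String)) : PySem.Set String × List String :=
  let d := PySem.Dict.mk r
  let pattern := d.getD "pattern" ""
  if pattern = "" then acc
  else
    let scope := d.getD "scope" "ALL"
    if (scope ≠ "" ∧ scope ≠ "ALL") ∧ scope ≠ program then acc
    else
      let match_type := d.getD "match_type" "NAME_EXACT"
      if match_type = "NAME_EXACT" then (PySem.Set.add acc.1 pattern, acc.2)
      else if match_type = "NAME_PREFIX" then (acc.1, acc.2 ++ [pattern])
      else acc

def should_ignore_entry_alt (entry : List (String × String)) (rules : List (List (String × String))) : Bool :=
  let program := pvNorm entry "program"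
  let grouped := rules.foldl (pvClassify program) (PySem.Set.empty, [])
  let name := pvNorm entry "name"
  PySem.Set.contains grouped.1 name || grouped.2.any (fun p => PySem.Str.startswith name p)

-- ===== PRECONDITION & SPEC =====
def Spec_should_ignore_entry (entry : List (String × String)) (rules : List (List (String × String))) (out : Bool) : Prop := out = should_ignore_entry_alt entry rules
instance (entry : List (String × String)) (rules : List (List (String × String))) (out : Bool) : Decidable (Spec_should_ignore_entry entry rules out) := by unfold Spec_should_ignore_entry; infer_instance

-- ===== CLAIM (what is proved, stated in full; the proofs are below) =====
def Claim_equal_should_ignore_entry : Prop := ∀ (entry : List (String × String)) (rules : List (List (String × String))), Dom_should_ignore_entry entry rules → Spec_should_ignore_entry entry rules (should_ignore_entry entry rules)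

-- ===== LEMMAS AND PROOFS =====

theorem pv_contains_add (s : PySem.Set String) (x y : String) :
    PySem.Set.contains (PySem.Set.add s x) y = (PySem.Set.contains s y || decide (y = x)) := by
  simp only [PySem.Set.add]
  split_ifs with hc <;> by_cases h : y = x <;> simp_all [PySem.Set.contains]

theorem pv_loop_eq (program name : String) (rules : List (List (String × String)))
    (E : PySem.Set String) (P : List String) :
    (PySem.Set.contains (rules.foldl (pvClassify program) (E, P)).1 name
      || (rules.foldl (pvClassify program) (E, P)).2.any (fun p => PySem.Str.startswith name p))
    = ((PySem.Set.contains E name || P.any (fun p => PySem.Str.startswith name p))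
        || pvALoop program name rules) := by
  induction rules generalizing E P with
  | nil => simp [pvALoop]
  | cons r rest ih =>
    simp only [List.foldl_cons, pvALoop, pvClassify]
    split_ifs with h1 h2 h3 h4 h5 h6
    · rw [ih]
    · rw [ih]
    · rw [ih, pv_contains_add]; simp_all
    · rw [ih, pv_contains_add]; simp_all
    · rw [ih]; simp_all [List.any_append]
    · rw [ih]; simp_all [List.any_append]
    · rw [ih]

-- ===== VERDICT (by name: the statement is the Claim_ definition above) =====
theorem should_ignore_entry_spec : Claim_equal_should_ignore_entry := by
  intro entry rules _
  unfold Spec_should_ignore_entry should_ignore_entry should_ignore_entry_alt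
  rw [pv_loop_eq]
  cases rules <;> simp [pvALoop, PySem.Set.empty, PySem.Set.contains]
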